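-- pv_equiv track=rewrite | github.com/0xHoneyJar/loa | grimoires/loa/cycles/cycle-103-provider-unification/handoffs/httpx-large-body-spike.py | make_filler_prompt
-- ===== SOURCE A (Python) =====
-- def make_filler_prompt(target_body_bytes: int) -> str:
--     """
--     Build a prompt of approximately target_body_bytes of meaningful-looking text.
--
--     Uses a diff-like filler because BB review payloads are diffs — keeps shape
--     similar to what KF-008 was observed against.
--     """
--     header = (
--         "You are reviewing the following diff. Summarize in one sentence what "
--         "the change does. Do not generate code; respond only with the summary.\n\n"
--         "```diff\n"
--     )
--     footer = "\n```\nSummary:"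
--
--     # JSON envelope adds ~300 bytes (request structure for Gemini); leave 800
--     # bytes of headroom so wall body size lands at or just above the target.
--     envelope_overhead = 800
--     content_budget = max(0, target_body_bytes - len(header) - len(footer) - envelope_overhead)
--
--     line = "+ const newFlag = config.enabled ?? false; // adapter-{n:06d} cycle-103 hardening\n"
--     lines_needed = (content_budget // len(line.format(n=0))) + 1
--     body_lines = "".join(line.format(n=i) for i in range(lines_needed))
--
--     return header + body_lines[:content_budget] + footer
-- ===== SOURCE B (Python) =====
-- def make_filler_prompt(target_body_bytes: int) -> str:
--     """
--     Build a prompt of approximately target_body_bytes of meaningful-looking text.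
--     Grows the filler incrementally until the content budget is met, instead of
--     precomputing the line count by division.
--     """
--     header = (
--         "You are reviewing the following diff. Summarize in one sentence what "
--         "the change does. Do not generate code; respond only with the summary.\n\n"
--         "```diff\n"
--     )
--     footer = "\n```\nSummary:"
--
--     envelope_overhead = 800
--     content_budget = max(0, target_body_bytes - len(header) - len(footer) - envelope_overhead)
--
--     line = "+ const newFlag = config.enabled ?? false; // adapter-{n:06d} cycle-103 hardening\n"
--     pieces = []
--     total = 0
--     i = 0
--     while total < content_budget:
--         piece = line.format(n=i)
--         pieces.append(piece)
--         total += len(piece)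
--         i += 1
--
--     return header + "".join(pieces)[:content_budget] + footer
-- ===== Notes on version B (the rewrite author's own statement) =====
-- stated objective: simpler
-- what changed: B replaces A's division-precomputed line count and range comprehension by an incremental while loop that appends filler lines until the accumulated length reaches the content budget, then slices to the exact budget.
import Mathlib
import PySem

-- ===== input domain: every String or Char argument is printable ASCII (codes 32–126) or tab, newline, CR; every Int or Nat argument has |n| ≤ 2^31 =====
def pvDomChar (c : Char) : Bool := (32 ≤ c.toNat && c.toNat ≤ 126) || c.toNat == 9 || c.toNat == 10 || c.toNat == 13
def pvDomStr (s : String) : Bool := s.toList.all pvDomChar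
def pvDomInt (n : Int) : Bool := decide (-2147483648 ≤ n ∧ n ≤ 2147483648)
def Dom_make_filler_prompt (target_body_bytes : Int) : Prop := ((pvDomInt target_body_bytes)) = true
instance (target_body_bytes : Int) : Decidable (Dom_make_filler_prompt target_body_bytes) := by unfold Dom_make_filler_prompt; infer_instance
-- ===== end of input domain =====

-- B replaces A's division-precomputed line count by an incremental loop that appends
-- filler lines until the accumulated length reaches the content budget (objective: simpler decomposition).

-- ===== PORT A =====
-- shared string literals of both Pythons (ASCII)
def fillerHeader : List Char :=
  ("You are reviewing the following diff. Summarize in one sentence what " ++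
   "the change does. Do not generate code; respond only with the summary.\n\n" ++
   "```diff\n").toList

def fillerFooter : List Char := "\n```\nSummary:".toList

-- line.format(n=i): "{n:06d}" is str(i) zero-padded to width 6 (sign in front);
-- ported exactly via PySem.Chars.zfill.
def fillerLine (n : Int) : List Char :=
  "+ const newFlag = config.enabled ?? false; // adapter-".toList ++
  PySem.Chars.zfill (PySem.Int.toChars n) 6 ++
  " cycle-103 hardening\n".toList

def make_filler_prompt (target_body_bytes : Int) : String :=
  let envelope_overhead : Int := 800
  let content_budget : Int :=
    max 0 (target_body_bytes - (fillerHeader.length : Int) - (fillerFooter.length : Int) - envelope_overhead)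
  let lines_needed : Int := PySem.Int.floordiv content_budget ((fillerLine 0).length : Int) + 1
  let body_lines : List Char := ((PySem.List.pyRange 0 lines_needed 1).map (fun i => fillerLine i)).flatten
  String.ofList (fillerHeader ++ PySem.List.slice body_lines none (some content_budget) ++ fillerFooter)

-- ===== PORT B =====
-- termination of the while loop: each appended line is nonempty
theorem fillerLine_length_pos (n : Int) : 0 < (fillerLine n).length := by
  simp [fillerLine]

-- the while loop of Source B: append line i and grow the total until total ≥ content_budget
def fillerGo (content_budget : Int) (i : Int) (pieces : List (List Char)) (total : Int) :
    List (List Char) :=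
  if total < content_budget then
    let piece := fillerLine i
    fillerGo content_budget (i + 1) (pieces ++ [piece]) (total + (piece.length : Int))
  else
    pieces
termination_by (content_budget - total).toNat
decreasing_by
  have := fillerLine_length_pos i
  omega

def make_filler_prompt_alt (target_body_bytes : Int) : String :=
  let envelope_overhead : Int := 800
  let content_budget : Int :=
    max 0 (target_body_bytes - (fillerHeader.length : Int) - (fillerFooter.length : Int) - envelope_overhead)
  let pieces := fillerGo content_budget 0 [] 0
  String.ofList (fillerHeader ++ PySem.List.slice pieces.flatten none (some content_budget) ++ fillerFooter)

-- ===== PRECONDITION & SPEC =====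
def Spec_make_filler_prompt (target_body_bytes : Int) (out : String) : Prop := out = make_filler_prompt_alt target_body_bytes
instance (target_body_bytes : Int) (out : String) : Decidable (Spec_make_filler_prompt target_body_bytes out) := by unfold Spec_make_filler_prompt; infer_instance

-- ===== CLAIM (what is proved, stated in full; the proofs are below) =====
def Claim_equal_make_filler_prompt : Prop := ∀ (target_body_bytes : Int), Dom_make_filler_prompt target_body_bytes → Spec_make_filler_prompt target_body_bytes (make_filler_prompt target_body_bytes)

-- ===== LEMMAS AND PROOFS =====

-- J n = concatenation of filler lines 0 .. n-1
def fillerJ (n : Nat) : List Char :=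
  ((List.range n).map (fun k => fillerLine (k : Int))).flatten

theorem fillerJ_succ (n : Nat) : fillerJ (n + 1) = fillerJ n ++ fillerLine (n : Int) := by
  simp [fillerJ, List.range_succ]

theorem fillerLine_length_ge (n : Int) : 81 ≤ (fillerLine n).length := by
  simp [fillerLine, PySem.Chars.length_zfill]

theorem fillerJ_length_ge (n : Nat) : 81 * n ≤ (fillerJ n).length := by
  induction n with
  | zero => simp [fillerJ]
  | succ k ih =>
    rw [fillerJ_succ]
    have := fillerLine_length_ge (k : Int)
    simp only [List.length_append]
    omega

theorem fillerJ_prefix {m n : Nat} (h : m ≤ n) : fillerJ m <+: fillerJ n := by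
  induction h with
  | refl => exact List.prefix_refl _
  | step h ih =>
    rw [fillerJ_succ]
    exact ih.trans (List.prefix_append _ _)

theorem take_of_prefix {xs ys : List Char} {b : Nat} (h : xs <+: ys) (hb : b ≤ xs.length) :
    ys.take b = xs.take b := by
  obtain ⟨t, rfl⟩ := h
  rw [List.take_append_of_le_length hb]

theorem fillerJ_take_eq {b m n : Nat} (hm : b ≤ (fillerJ m).length) (hn : b ≤ (fillerJ n).length) :
    (fillerJ m).take b = (fillerJ n).take b := by
  rcases le_total m n with h | h
  · rw [take_of_prefix (fillerJ_prefix h) hm]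
  · rw [take_of_prefix (fillerJ_prefix h) hn]

-- invariant of Source B's while loop
theorem fillerGo_spec (cb : Int) :
    ∀ (fuel n : Nat) (pieces : List (List Char)) (total : Int),
      (cb - total).toNat ≤ fuel →
      pieces.flatten = fillerJ n →
      total = ((fillerJ n).length : Int) →
      ∃ m, (fillerGo cb (n : Int) pieces total).flatten = fillerJ m ∧
        cb ≤ ((fillerJ m).length : Int) := by
  intro fuel
  induction fuel with
  | zero =>
    intro n pieces total hf hfl ht
    have hstop : ¬ total < cb := by omega
    rw [fillerGo, if_neg hstop]
    exact ⟨n, hfl, by omega⟩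
  | succ k ih =>
    intro n pieces total hf hfl ht
    by_cases hlt : total < cb
    · rw [fillerGo, if_pos hlt]
      simp only []
      have hcast : (n : Int) + 1 = ((n + 1 : Nat) : Int) := by push_cast; ring
      rw [hcast]
      have hpos := fillerLine_length_pos (n : Int)
      refine ih (n + 1) (pieces ++ [fillerLine (n : Int)]) _ ?_ ?_ ?_
      · omega
      · simp [hfl, fillerJ_succ]
      · rw [fillerJ_succ]
        simp only [List.length_append]
        push_cast
        omega
    · rw [fillerGo, if_neg hlt]
      exact ⟨n, hfl, by omega⟩

-- length of line 0 (used for A's division)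
theorem fillerLine_zero_length : (fillerLine 0).length = 81 := by decide

-- ===== VERDICT (by name: the statement is the Claim_ definition above) =====
theorem make_filler_prompt_spec : Claim_equal_make_filler_prompt := by
  intro t _
  unfold Spec_make_filler_prompt make_filler_prompt make_filler_prompt_alt
  simp only []
  set cb : Int := max 0 (t - (fillerHeader.length : Int) - (fillerFooter.length : Int) - 800) with hcb
  have hcb0 : 0 ≤ cb := le_max_left _ _
  -- A's body is fillerJ of the precomputed count
  have hLn : PySem.Int.floordiv cb ((fillerLine 0).length : Int) + 1 = cb / 81 + 1 := by
    rw [fillerLine_zero_length]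
    rw [PySem.Int.floordiv_eq_ediv_of_pos (by norm_num)]
    norm_num
  rw [hLn]
  have hA : ((PySem.List.pyRange 0 (cb / 81 + 1) 1).map (fun i => fillerLine i)).flatten
      = fillerJ (cb / 81 + 1).toNat := by
    rw [PySem.List.pyRange_one, List.map_map]
    simp only [Int.sub_zero, fillerJ]
    generalize (List.range (cb / 81 + 1).toNat) = l
    induction l with
    | nil => rfl
    | cons x xs ih =>
      simp [List.flatMap_cons, Function.comp_def] at ih ⊢
      simp [ih]
  rw [hA]
  -- B's loop result
  obtain ⟨m, hm, hmlen⟩ := fillerGo_spec cb cb.toNat 0 [] 0 (by omega) (by simp [fillerJ]) (by simp [fillerJ])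
  norm_num at hm
  rw [hm]
  -- both slices are takes of equal prefixes
  rw [PySem.List.slice_to _ hcb0, PySem.List.slice_to _ hcb0]
  have hNA : cb.toNat ≤ (fillerJ (cb / 81 + 1).toNat).length := by
    have h1 := fillerJ_length_ge (cb / 81 + 1).toNat
    omega
  have hNB : cb.toNat ≤ (fillerJ m).length := by omega
  rw [fillerJ_take_eq hNA hNB]
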